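-- pv_equiv track=rewrite | github.com/NileshSikri/CRIO-Launch-ProblemSolving | MessagePassing/MessagePassing.py | canMessageBePassed
-- ===== SOURCE A (Python) =====
-- def spiralOrder(rows,cols,matrix):
--     res = []
--
--     init_row = 0
--     init_col = 0
--     final_row = rows
--     final_col = cols
--
--     while(init_row<final_row and init_col<final_col):
--         for i in range(init_col,final_col):
--             res.append(matrix[init_row][i])
--         init_row +=1
--         for j in range(init_row,final_row):
--             res.append(matrix[j][final_col-1])
--         final_col -=1
--         if(init_row<final_row):
--             for i in range(final_col-1,init_col-1,-1):
--                 res.append(matrix[final_row-1][i])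
--         final_row -=1
--         if(init_col<final_col):
--             for j in range(final_row-1,init_row-1,-1):
--                 res.append(matrix[j][init_col])
--             init_col +=1
--     return res
--
-- def canMessageBePassed(n, maze):
--     spiral = spiralOrder(n,n,maze)
--     i,stre = 0,0
--     while(i<len(spiral)):
--         if(spiral[i]>=stre):
--             stre = spiral[i]
--             i+=1
--         else:
--             i+=1
--             if(stre-1>0 and i<len(spiral)-1):
--                 stre-=1
--             elif(stre-1>=0 and i==len(spiral)-1):
--                 return True
--             else:
--                 return False
--     if(stre>0):
--         return True
-- ===== SOURCE B (Python) =====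
-- def canMessageBePassed(n, maze):
--     # spiral order via a single boundary-walker: one position, a direction
--     # index, and shrinking bounds; turn clockwise when the next step would
--     # leave the still-unvisited rectangle.
--     spiral = []
--     if n > 0:
--         top, bot, left, right = 0, n, 0, n
--         r, c, d = 0, 0, 0
--         for _ in range(n * n):
--             spiral.append(maze[r][c])
--             if d == 0:
--                 if c + 1 < right:
--                     c += 1
--                 else:
--                     d, top, r = 1, top + 1, r + 1
--             elif d == 1:
--                 if r + 1 < bot:
--                     r += 1
--                 else:
--                     d, right, c = 2, right - 1, c - 1
--             elif d == 2:
--                 if c - 1 >= left: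
--                     c -= 1
--                 else:
--                     d, bot, r = 3, bot - 1, r - 1
--             else:
--                 if r - 1 >= top:
--                     r -= 1
--                 else:
--                     d, left, c = 0, left + 1, c + 1
--     i, stre = 0, 0
--     while i < len(spiral):
--         if spiral[i] >= stre:
--             stre = spiral[i]
--             i += 1
--         else:
--             i += 1
--             if stre - 1 > 0 and i < len(spiral) - 1:
--                 stre -= 1
--             elif stre - 1 >= 0 and i == len(spiral) - 1:
--                 return True
--             else:
--                 return False
--     if stre > 0:
--         return True
-- ===== Notes on version B (the rewrite author's own statement) =====
-- stated objective: alternative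
-- what changed: B generates the spiral with a single boundary-walker (current position, a direction index cycled clockwise, shrinking bounds, exactly n*n steps) instead of A's layer-by-layer loop with four separate row/column for-loops per layer; the subsequent strength-threshold walk is unchanged.
import Mathlib
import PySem

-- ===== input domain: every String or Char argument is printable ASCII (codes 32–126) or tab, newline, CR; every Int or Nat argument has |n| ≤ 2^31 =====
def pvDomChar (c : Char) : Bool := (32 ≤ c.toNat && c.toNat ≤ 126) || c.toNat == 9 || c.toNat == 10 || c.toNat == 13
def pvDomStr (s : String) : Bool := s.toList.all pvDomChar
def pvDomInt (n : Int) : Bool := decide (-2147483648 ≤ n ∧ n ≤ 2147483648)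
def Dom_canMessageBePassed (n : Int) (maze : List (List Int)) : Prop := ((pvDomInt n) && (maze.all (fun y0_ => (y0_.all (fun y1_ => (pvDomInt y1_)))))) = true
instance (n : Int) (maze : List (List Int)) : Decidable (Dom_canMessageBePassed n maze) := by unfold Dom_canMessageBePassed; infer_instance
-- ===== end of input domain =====

-- B replaces A's layer-by-layer four-loop spiral generation by a single boundary-walker
-- (position + direction index + shrinking bounds, turning clockwise at a boundary); the
-- subsequent strength-threshold walk is textually the same in both Pythons, so both ports
-- share its transliteration (walkLoop) and the cell accessor (get2 = maze[r][c], total via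
-- default 0; Pre_ excludes exactly the inputs where that access raises IndexError).

-- ===== PORT A =====
-- maze[r][c]; Pre_ guarantees the indices are in range, so the default is never returned
def get2 (m : List (List Int)) (r c : Int) : Int :=
  PySem.List.pyGetD (PySem.List.pyGetD m r []) c 0

-- the while-loop of spiralOrder, state (init_row, init_col, final_row, final_col);
-- structural recursion on a fuel that counts loop iterations (the loop peels one layer per
-- iteration, so rows.toNat iterations always suffice; with the guard false it returns [])
def spiralLoop (m : List (List Int)) : Nat → Int → Int → Int → Int → List Int
  | 0, _, _, _, _ => []
  | g+1, ir, ic, fr, fc =>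
    if ir < fr ∧ ic < fc then
      ((PySem.List.pyRange ic fc 1).map fun i => get2 m ir i)
      ++ ((PySem.List.pyRange (ir+1) fr 1).map fun j => get2 m j (fc-1))
      ++ (if ir+1 < fr then (PySem.List.pyRange (fc-1-1) (ic-1) (-1)).map fun i => get2 m (fr-1) i else [])
      ++ (if ic < fc-1 then (PySem.List.pyRange (fr-1-1) (ir+1-1) (-1)).map fun j => get2 m j ic else [])
      ++ spiralLoop m g (ir+1) (if ic < fc-1 then ic+1 else ic) (fr-1) (fc-1)
    else []

-- the strength-threshold while-loop, shared verbatim by both Pythons; i starts at 0 and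
-- grows by exactly 1 per iteration, so with fuel = len - i the guard i < len is fuel > 0
def walkLoop (sp : List Int) : Nat → Int → Int → Option Bool
  | 0, _, stre => if 0 < stre then some true else none
  | f+1, i, stre =>
    let v := PySem.List.pyGetD sp i 0
    if stre ≤ v then walkLoop sp f (i+1) v
    else if stre - 1 > 0 ∧ i+1 < (sp.length : Int) - 1 then walkLoop sp f (i+1) (stre-1)
    else if stre - 1 ≥ 0 ∧ i+1 = (sp.length : Int) - 1 then some true
    else some false

def canMessageBePassed (n : Int) (maze : List (List Int)) : Option Bool :=
  let spiral := spiralLoop maze n.toNat 0 0 n n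
  walkLoop spiral spiral.length 0 0

-- ===== PORT B =====
-- the n*n-step boundary walker of Source B: fuel = remaining steps, state (r, c, d, top, bot, left, right)
def walkB (m : List (List Int)) : Nat → Int → Int → Int → Int → Int → Int → Int → List Int
  | 0, _, _, _, _, _, _, _ => []
  | f+1, r, c, d, top, bot, left, right =>
    get2 m r c ::
    (if d = 0 then
      if c + 1 < right then walkB m f r (c+1) 0 top bot left right
      else walkB m f (r+1) c 1 (top+1) bot left right
    else if d = 1 then
      if r + 1 < bot then walkB m f (r+1) c 1 top bot left right
      else walkB m f r (c-1) 2 top bot left (right-1)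
    else if d = 2 then
      if left ≤ c - 1 then walkB m f r (c-1) 2 top bot left right
      else walkB m f (r-1) c 3 top (bot-1) left right
    else
      if top ≤ r - 1 then walkB m f (r-1) c 3 top bot left right
      else walkB m f r (c+1) 0 top bot (left+1) right)

def canMessageBePassed_alt (n : Int) (maze : List (List Int)) : Option Bool :=
  let spiral := if 0 < n then walkB maze (n*n).toNat 0 0 0 0 n 0 n else []
  walkLoop spiral spiral.length 0 0

-- ===== PRECONDITION & SPEC =====
-- Pre_ excludes exactly the inputs on which Python A raises IndexError:
-- n > 0 but maze has fewer than n rows or one of its first n rows has fewer than n columns.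
def Pre_canMessageBePassed (n : Int) (maze : List (List Int)) : Prop :=
  n ≤ 0 ∨ (n ≤ (maze.length : Int) ∧ ∀ row ∈ maze.take n.toNat, n ≤ (row.length : Int))
instance (n : Int) (maze : List (List Int)) : Decidable (Pre_canMessageBePassed n maze) := by
  unfold Pre_canMessageBePassed; infer_instance

def pvWitness_canMessageBePassed : Int × List (List Int) := (2, [[1, 2], [4, 3]])

def Spec_canMessageBePassed (n : Int) (maze : List (List Int)) (out : Option Bool) : Prop := out = canMessageBePassed_alt n maze
instance (n : Int) (maze : List (List Int)) (out : Option Bool) : Decidable (Spec_canMessageBePassed n maze out) := by unfold Spec_canMessageBePassed; infer_instance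

-- ===== CLAIM (what is proved, stated in full; the proofs are below) =====
def Claim_equal_canMessageBePassed : Prop := ∀ (n : Int) (maze : List (List Int)), Dom_canMessageBePassed n maze → Pre_canMessageBePassed n maze → Spec_canMessageBePassed n maze (canMessageBePassed n maze)

-- ===== LEMMAS AND PROOFS =====

-- one-step unfolding of spiralLoop (definitional) and its guard-false collapse
lemma spiralLoop_succ (m : List (List Int)) (g : Nat) (ir ic fr fc : Int) :
    spiralLoop m (g+1) ir ic fr fc =
      if ir < fr ∧ ic < fc then
        ((PySem.List.pyRange ic fc 1).map fun i => get2 m ir i)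
        ++ ((PySem.List.pyRange (ir+1) fr 1).map fun j => get2 m j (fc-1))
        ++ (if ir+1 < fr then (PySem.List.pyRange (fc-1-1) (ic-1) (-1)).map fun i => get2 m (fr-1) i else [])
        ++ (if ic < fc-1 then (PySem.List.pyRange (fr-1-1) (ir+1-1) (-1)).map fun j => get2 m j ic else [])
        ++ spiralLoop m g (ir+1) (if ic < fc-1 then ic+1 else ic) (fr-1) (fc-1)
      else [] := rfl

lemma spiralLoop_stop (m : List (List Int)) (g : Nat) (ir ic fr fc : Int)
    (h : ¬(ir < fr ∧ ic < fc)) : spiralLoop m g ir ic fr fc = [] := by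
  cases g with
  | zero => rfl
  | succ g => rw [spiralLoop_succ, if_neg h]

-- one-step unfoldings of walkB for each literal direction (definitional)
lemma walkB_succ0 (m : List (List Int)) (f : Nat) (r c top bot left right : Int) :
    walkB m (f+1) r c 0 top bot left right = get2 m r c ::
      (if c + 1 < right then walkB m f r (c+1) 0 top bot left right
       else walkB m f (r+1) c 1 (top+1) bot left right) := rfl

lemma walkB_succ1 (m : List (List Int)) (f : Nat) (r c top bot left right : Int) :
    walkB m (f+1) r c 1 top bot left right = get2 m r c ::
      (if r + 1 < bot then walkB m f (r+1) c 1 top bot left right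
       else walkB m f r (c-1) 2 top bot left (right-1)) := rfl

lemma walkB_succ2 (m : List (List Int)) (f : Nat) (r c top bot left right : Int) :
    walkB m (f+1) r c 2 top bot left right = get2 m r c ::
      (if left ≤ c - 1 then walkB m f r (c-1) 2 top bot left right
       else walkB m f (r-1) c 3 top (bot-1) left right) := rfl

lemma walkB_succ3 (m : List (List Int)) (f : Nat) (r c top bot left right : Int) :
    walkB m (f+1) r c 3 top bot left right = get2 m r c ::
      (if top ≤ r - 1 then walkB m f (r-1) c 3 top bot left right
       else walkB m f r (c+1) 0 top bot (left+1) right) := rfl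

lemma range_succ_map_shift {α : Type} (g : Int → α) (c : Int) (j : Nat) :
    (List.range (j+1)).map (fun t : Nat => g (c + t)) =
      g c :: (List.range j).map (fun t : Nat => g ((c+1) + t)) := by
  rw [List.range_succ_eq_map]
  simp only [List.map_cons, List.map_map, Nat.cast_zero, add_zero]
  refine congrArg _ (List.map_congr_left fun t _ => congrArg g ?_)
  push_cast [Function.comp]; ring

lemma range_succ_map_shift_down {α : Type} (g : Int → α) (c : Int) (j : Nat) :
    (List.range (j+1)).map (fun t : Nat => g (c - t)) =
      g c :: (List.range j).map (fun t : Nat => g ((c-1) - t)) := by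
  rw [List.range_succ_eq_map]
  simp only [List.map_cons, List.map_map, Nat.cast_zero, sub_zero]
  refine congrArg _ (List.map_congr_left fun t _ => congrArg g ?_)
  push_cast [Function.comp]; ring

-- phase lemmas: what the walker emits along one straight segment, ending in a turn
lemma walkB_phase0 (m : List (List Int)) (top bot left right : Int) :
    ∀ (j f : Nat) (r c : Int), c + (j : Int) + 1 = right →
      walkB m (j + 1 + f) r c 0 top bot left right =
        ((List.range (j+1)).map fun t : Nat => get2 m r (c + t))
          ++ walkB m f (r+1) (right-1) 1 (top+1) bot left right := by
  intro j
  induction j with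
  | zero =>
    intro f r c h
    have hc : c = right - 1 := by omega
    subst hc
    rw [show 0 + 1 + f = f + 1 by omega, walkB_succ0, if_neg (by omega)]
    simp
  | succ j ih =>
    intro f r c h
    rw [show j + 1 + 1 + f = (j + 1 + f) + 1 by omega, walkB_succ0,
        if_pos (by push_cast at h ⊢; omega)]
    rw [ih f r (c+1) (by push_cast at h ⊢; omega)]
    rw [range_succ_map_shift (fun x => get2 m r x) c (j+1)]
    simp

lemma walkB_phase1 (m : List (List Int)) (top bot left right : Int) :
    ∀ (j f : Nat) (r c : Int), r + (j : Int) + 1 = bot →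
      walkB m (j + 1 + f) r c 1 top bot left right =
        ((List.range (j+1)).map fun t : Nat => get2 m (r + t) c)
          ++ walkB m f (bot-1) (c-1) 2 top bot left (right-1) := by
  intro j
  induction j with
  | zero =>
    intro f r c h
    have hr : r = bot - 1 := by omega
    subst hr
    rw [show 0 + 1 + f = f + 1 by omega, walkB_succ1, if_neg (by omega)]
    simp
  | succ j ih =>
    intro f r c h
    rw [show j + 1 + 1 + f = (j + 1 + f) + 1 by omega, walkB_succ1,
        if_pos (by push_cast at h ⊢; omega)]
    rw [ih f (r+1) c (by push_cast at h ⊢; omega)]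
    rw [range_succ_map_shift (fun x => get2 m x c) r (j+1)]
    simp

lemma walkB_phase2 (m : List (List Int)) (top bot left right : Int) :
    ∀ (j f : Nat) (r c : Int), c - (j : Int) = left →
      walkB m (j + 1 + f) r c 2 top bot left right =
        ((List.range (j+1)).map fun t : Nat => get2 m r (c - t))
          ++ walkB m f (r-1) left 3 top (bot-1) left right := by
  intro j
  induction j with
  | zero =>
    intro f r c h
    have hc : c = left := by omega
    subst hc
    rw [show 0 + 1 + f = f + 1 by omega, walkB_succ2, if_neg (by omega)]
    simp
  | succ j ih =>
    intro f r c h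
    rw [show j + 1 + 1 + f = (j + 1 + f) + 1 by omega, walkB_succ2,
        if_pos (by push_cast at h ⊢; omega)]
    rw [ih f r (c-1) (by push_cast at h ⊢; omega)]
    rw [range_succ_map_shift_down (fun x => get2 m r x) c (j+1)]
    simp

lemma walkB_phase3 (m : List (List Int)) (top bot left right : Int) :
    ∀ (j f : Nat) (r c : Int), r - (j : Int) = top →
      walkB m (j + 1 + f) r c 3 top bot left right =
        ((List.range (j+1)).map fun t : Nat => get2 m (r - t) c)
          ++ walkB m f top (c+1) 0 top bot (left+1) right := by
  intro j
  induction j with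
  | zero =>
    intro f r c h
    have hr : r = top := by omega
    subst hr
    rw [show 0 + 1 + f = f + 1 by omega, walkB_succ3, if_neg (by omega)]
    simp
  | succ j ih =>
    intro f r c h
    rw [show j + 1 + 1 + f = (j + 1 + f) + 1 by omega, walkB_succ3,
        if_pos (by push_cast at h ⊢; omega)]
    rw [ih f (r-1) c (by push_cast at h ⊢; omega)]
    rw [range_succ_map_shift_down (fun x => get2 m x c) r (j+1)]
    simp

-- the central ring lemma: on a square s×s ring starting at (k,k) the two spirals agree
lemma ring_eq (m : List (List Int)) :
    ∀ (s : Nat) (k : Int) (g : Nat), 1 ≤ s → s ≤ 2*g →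
      spiralLoop m g k k (k + (s:Int)) (k + (s:Int)) =
        walkB m (s*s) k k 0 k (k + (s:Int)) k (k + (s:Int)) := by
  intro s
  induction s using Nat.strong_induction_on with
  | _ s IH =>
  intro k g hs hg
  obtain ⟨g, rfl⟩ : ∃ g', g = g' + 1 := ⟨g-1, by omega⟩
  rcases s with _ | s
  · omega
  rcases s with _ | u
  · -- s = 1
    simp only [Nat.cast_one, Nat.zero_add]
    rw [spiralLoop_succ, if_pos (by constructor <;> omega)]
    rw [PySem.List.pyRange_one_singleton]
    rw [PySem.List.pyRange_one_eq_nil (le_refl (k+1))]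
    rw [if_neg (by omega : ¬(k+1 < k+1))]
    rw [if_neg (by omega : ¬(k < k+1-1))]
    rw [if_neg (by omega : ¬(k < k+1-1))]
    rw [spiralLoop_stop m g (k+1) k (k+1-1) (k+1-1) (by omega)]
    rw [show (1:Nat)*1 = 0+1 by norm_num, walkB_succ0]
    simp [walkB]
  · -- s = u + 2
    have hR : (((u+1+1 : Nat)):Int) = (u:Int) + 2 := by push_cast; ring
    rw [hR]
    rw [show (u+1+1) * (u+1+1) = (u+1) + 1 + (u*u+3*u+2) by ring]
    rw [walkB_phase0 m k (k+((u:Int)+2)) k (k+((u:Int)+2)) (u+1) (u*u+3*u+2) k k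
        (by push_cast; ring)]
    rw [show u+1+1 = u+2 by omega]
    rw [show u*u+3*u+2 = u + 1 + (u*u+2*u+1) by ring]
    rw [walkB_phase1 m (k+1) (k+((u:Int)+2)) k (k+((u:Int)+2)) u (u*u+2*u+1) (k+1)
        (k+((u:Int)+2)-1) (by push_cast; ring)]
    rw [show u*u+2*u+1 = u + 1 + (u*u+u) by ring]
    rw [walkB_phase2 m (k+1) (k+((u:Int)+2)) k (k+((u:Int)+2)-1) u (u*u+u)
        (k+((u:Int)+2)-1) (k+((u:Int)+2)-1-1) (by push_cast; ring)]
    -- unfold the A-side ring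
    rw [spiralLoop_succ, if_pos (by constructor <;> omega)]
    rw [PySem.List.pyRange_one]
    rw [show k+((u:Int)+2)-k = (((u+2:Nat)):Int) by push_cast; ring, Int.toNat_natCast,
        List.map_map]
    rw [PySem.List.pyRange_one]
    rw [show k+((u:Int)+2)-(k+1) = (((u+1:Nat)):Int) by push_cast; ring, Int.toNat_natCast,
        List.map_map]
    rw [if_pos (by omega : k+1 < k+((u:Int)+2))]
    rw [PySem.List.pyRange_neg_one]
    rw [show k+((u:Int)+2)-1-1-(k-1) = (((u+1:Nat)):Int) by push_cast; ring, Int.toNat_natCast,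
        List.map_map]
    rw [if_pos (by omega : k < k+((u:Int)+2)-1)]
    rw [PySem.List.pyRange_neg_one]
    rw [show k+((u:Int)+2)-1-1-(k+1-1) = ((u:Nat):Int) by push_cast; ring, Int.toNat_natCast,
        List.map_map]
    by_cases hu : u = 0
    · subst hu
      rw [if_pos (by push_cast; omega : k < k + (((0:Nat):Int) + 2) - 1)]
      rw [show (0:Nat)*0+0 = 0 by norm_num]
      rw [spiralLoop_stop m g (k+1) (k+1) (k + (((0:Nat):Int) + 2) - 1)
          (k + (((0:Nat):Int) + 2) - 1) (by push_cast; omega)]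
      simp [walkB, Function.comp_def, List.append_assoc]
    · obtain ⟨v, rfl⟩ : ∃ v, u = v + 1 := ⟨u-1, by omega⟩
      rw [show (v+1)*(v+1)+(v+1) = v + 1 + ((v+1)*(v+1)) by ring]
      rw [walkB_phase3 m (k+1) (k+((((v+1):Nat):Int)+2)-1) k (k+((((v+1):Nat):Int)+2)-1) v
          ((v+1)*(v+1)) (k+((((v+1):Nat):Int)+2)-1-1) k (by push_cast; ring)]
      rw [show k+((((v+1):Nat):Int)+2)-1 = k+1+(((v+1):Nat):Int) by push_cast; ring]
      rw [← IH (v+1) (by omega) (k+1) g (by omega) (by omega)]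
      rw [if_pos (by push_cast; omega : k < k + 1 + (((v+1:Nat)):Int))]
      simp [Function.comp_def, List.append_assoc]

-- the two spiral generators agree for every n
lemma spiral_eq (n : Int) (m : List (List Int)) :
    spiralLoop m n.toNat 0 0 n n = (if 0 < n then walkB m (n*n).toNat 0 0 0 0 n 0 n else []) := by
  by_cases hn : 0 < n
  · rw [if_pos hn]
    obtain ⟨s, hs⟩ : ∃ s : Nat, n = (s:Int) := ⟨n.toNat, by omega⟩
    subst hs
    have h1 : 1 ≤ s := by exact_mod_cast hn
    have := ring_eq m s 0 s h1 (by omega)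
    simpa using this
  · rw [if_neg hn, spiralLoop_stop m n.toNat 0 0 n n (by omega)]

-- ===== VERDICT (by name: the statement is the Claim_ definition above) =====
theorem canMessageBePassed_spec : Claim_equal_canMessageBePassed := by
  intro n maze _ _
  unfold Spec_canMessageBePassed canMessageBePassed canMessageBePassed_alt
  rw [spiral_eq]
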